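-- pv_equiv track=rewrite | github.com/wansang93/Algorithm | Programmers/Python/Code/더 맵게.py | solution
-- ===== SOURCE A (Python) =====
-- def solution(scoville, K):
--     answer = 0
--     mylist = sorted(scoville)
--     least = min(mylist)
--     while True:
--         if len(mylist) <= 1:
--             if mylist[0] < K:
--                 return -1
--             else:
--                 return answer
--         if least >= K:
--             break
--         else:
--             a = mylist.pop(0)
--             b = mylist.pop(0)
--             mylist.append(a + (b * 2))
--             mylist.sort()
--             least = min(mylist)
--             answer += 1
--     return answer
-- ===== SOURCE B (Python) =====
-- def solution(scoville, K):
--     # Sort once, then keep the list sorted by binary-search insertion of each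
--     # mixed value instead of re-sorting and re-scanning for the min every round.
--     xs = sorted(scoville)
--     n = 0
--     while xs[0] < K:
--         if len(xs) == 1:
--             return -1
--         v = xs[0] + 2 * xs[1]
--         rest = xs[2:]
--         lo, hi = 0, len(rest)
--         while lo < hi:
--             mid = (lo + hi) // 2
--             if rest[mid] < v:
--                 lo = mid + 1
--             else:
--                 hi = mid
--         xs = rest[:lo] + [v] + rest[lo:]
--         n += 1
--     return n
-- ===== Notes on version B (the rewrite author's own statement) =====
-- stated objective: faster
-- what changed: Instead of re-sorting the whole list and re-scanning it for the minimum after every mix, B sorts once and keeps the list sorted by inserting each mixed value at its binary-search position, reading the two smallest from the front.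
-- outside the precondition, e.g. on solution([], 7): A raises ValueError, B raises IndexError
import Mathlib
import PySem

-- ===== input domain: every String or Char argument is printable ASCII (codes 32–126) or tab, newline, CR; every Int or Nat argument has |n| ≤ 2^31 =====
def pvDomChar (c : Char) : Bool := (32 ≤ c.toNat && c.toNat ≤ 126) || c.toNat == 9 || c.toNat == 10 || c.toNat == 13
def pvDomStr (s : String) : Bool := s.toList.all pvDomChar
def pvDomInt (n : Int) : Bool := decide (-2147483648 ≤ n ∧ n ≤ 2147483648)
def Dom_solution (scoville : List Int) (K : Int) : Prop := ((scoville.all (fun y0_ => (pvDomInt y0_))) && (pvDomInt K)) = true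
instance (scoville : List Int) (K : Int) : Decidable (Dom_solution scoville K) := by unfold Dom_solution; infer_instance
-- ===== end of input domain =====

-- B replaces A's per-round full re-sort and min-scan by a single initial sort
-- maintained with binary-search ordered insertion (objective: faster, constant factor).

-- ===== PORT A =====
-- A's while-loop: pop the two smallest, append a + b*2, re-sort, recompute min.
-- pop(0); pop(0); append(x) on the list a :: b :: rest yields rest ++ [x].
def solutionGo (mylist : List Int) (least answer K : Int) : Int :=
  if mylist.length ≤ 1 then
    if (PySem.List.pyGet? mylist 0).getD 0 < K then -1 else answer
  else if least ≥ K then answer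
  else
    match mylist with
    | a :: b :: rest =>
        let newl := PySem.List.sorted (rest ++ [a + b * 2]) (fun x => x) false
        solutionGo newl ((PySem.List.min? newl (fun y => y)).getD 0) (answer + 1) K
    | _ => 0  -- unreachable: mylist.length > 1 in this branch
termination_by mylist.length
decreasing_by simp [PySem.List.length_sorted]

def solution (scoville : List Int) (K : Int) : Int :=
  let mylist := PySem.List.sorted scoville (fun x => x) false
  match PySem.List.min? mylist (fun y => y) with
  | none => 0  -- min([]) raises ValueError in Python; excluded by Pre_solution
  | some least => solutionGo mylist least 0 K

-- ===== PORT B =====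
-- Source B's inner binary-search loop: while lo < hi: mid = (lo+hi)//2; …
def bsLoop (rest : List Int) (v : Int) (lo hi : Nat) : Nat :=
  if lo < hi then
    if (PySem.List.pyGet? rest (((lo + hi) / 2 : Nat) : Int)).getD 0 < v then
      bsLoop rest v ((lo + hi) / 2 + 1) hi
    else
      bsLoop rest v lo ((lo + hi) / 2)
  else lo
termination_by hi - lo
decreasing_by all_goals omega

-- Source B's outer loop; rest[:lo] + [v] + rest[lo:] is take lo ++ v :: drop lo
-- (exact: 0 ≤ lo ≤ len(rest) by construction of the binary search).
def altGo (xs : List Int) (n K : Int) : Int :=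
  if (PySem.List.pyGet? xs 0).getD 0 < K then
    if xs.length = 1 then -1
    else
      match xs with
      | a :: b :: rest =>
          let v := a + 2 * b
          let lo := bsLoop rest v 0 rest.length
          altGo (rest.take lo ++ v :: rest.drop lo) (n + 1) K
      | _ => 0  -- unreachable: xs ≠ [] on every reachable call under Pre_solution
  else n
termination_by xs.length
decreasing_by simp

def solution_alt (scoville : List Int) (K : Int) : Int :=
  altGo (PySem.List.sorted scoville (fun x => x) false) 0 K

-- ===== PRECONDITION & SPEC =====
-- Pre_ excludes only the empty list, on which A raises ValueError (min([])).
def Pre_solution (scoville : List Int) (K : Int) : Prop := scoville ≠ []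
instance (scoville : List Int) (K : Int) : Decidable (Pre_solution scoville K) := by unfold Pre_solution; infer_instance

def pvWitness_solution : List Int × Int := ([2, 1, 3, 9, 10, 12], 7)

def Spec_solution (scoville : List Int) (K : Int) (out : Int) : Prop := out = solution_alt scoville K
instance (scoville : List Int) (K : Int) (out : Int) : Decidable (Spec_solution scoville K out) := by unfold Spec_solution; infer_instance

-- ===== CLAIM (what is proved, stated in full; the proofs are below) =====
def Claim_equal_solution : Prop := ∀ (scoville : List Int) (K : Int), Dom_solution scoville K → Pre_solution scoville K → Spec_solution scoville K (solution scoville K)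

-- ===== LEMMAS AND PROOFS =====

lemma foldl_min_eq (x : Int) (t : List Int) (h : ∀ y ∈ t, x ≤ y) : t.foldl min x = x := by
  induction t with
  | nil => rfl
  | cons y t ih =>
      have hxy : min x y = x := min_eq_left (h y (by simp))
      simp only [List.foldl_cons, hxy]
      exact ih (fun z hz => h z (by simp [hz]))

lemma min_sorted_head (x : Int) (t : List Int) (hs : (x :: t).Pairwise (· ≤ ·)) :
    (PySem.List.min? (x :: t) (fun y => y)).getD 0 = x := by
  rw [PySem.List.min?_id_cons]
  rcases List.pairwise_cons.mp hs with ⟨hx, -⟩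
  simp [foldl_min_eq x t hx]

-- bsLoop returns an index i with: everything before i is < v, everything from i on is ≥ v.
lemma bsLoop_bounds (l : List Int) (v : Int) (hs : l.Pairwise (· ≤ ·)) :
    ∀ (d lo hi : Nat), hi - lo = d → lo ≤ hi → hi ≤ l.length →
      (∀ j (hj : j < l.length), j < lo → l[j] < v) →
      (∀ j (hj : j < l.length), hi ≤ j → v ≤ l[j]) →
      bsLoop l v lo hi ≤ l.length ∧
      (∀ j (hj : j < l.length), j < bsLoop l v lo hi → l[j] < v) ∧
      (∀ j (hj : j < l.length), bsLoop l v lo hi ≤ j → v ≤ l[j]) := by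
  have hmono := List.pairwise_iff_getElem.mp hs
  intro d
  induction d using Nat.strong_induction_on with
  | _ d ih =>
    intro lo hi hd hlohi hhil hlow hhigh
    rw [bsLoop]
    by_cases hlt : lo < hi
    · simp only [hlt, if_true]
      have hmidlt : (lo + hi) / 2 < l.length := by omega
      have hget : (PySem.List.pyGet? l (((lo + hi) / 2 : Nat) : Int)).getD 0 = l[(lo + hi) / 2] := by
        rw [PySem.List.pyGet?_natCast]
        simp [List.getElem?_eq_getElem hmidlt]
      rw [hget]
      by_cases hcmp : l[(lo + hi) / 2] < v
      · simp only [hcmp, if_true]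
        refine ih (hi - ((lo + hi) / 2 + 1)) (by omega) _ _ rfl (by omega) hhil ?_ hhigh
        intro j hj hjlo
        by_cases hje : j = (lo + hi) / 2
        · subst hje; exact hcmp
        · calc l[j] ≤ l[(lo + hi) / 2] := by
                rcases Nat.lt_or_ge j ((lo + hi) / 2) with h | h
                · exact hmono j ((lo + hi) / 2) hj hmidlt h
                · omega
              _ < v := hcmp
      · simp only [hcmp, if_false]
        refine ih ((lo + hi) / 2 - lo) (by omega) _ _ rfl (by omega) (by omega) hlow ?_
        intro j hj hjge
        calc v ≤ l[(lo + hi) / 2] := not_lt.mp hcmp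
          _ ≤ l[j] := by
                rcases Nat.lt_or_ge ((lo + hi) / 2) j with h | h
                · exact hmono ((lo + hi) / 2) j hmidlt hj h
                · have hje : j = (lo + hi) / 2 := by omega
                  subst hje; exact le_refl _
    · simp only [hlt, if_false]
      exact ⟨by omega, fun j hj hjlo => hlow j hj (by omega), fun j hj hjge => hhigh j hj (by omega)⟩

-- sorting l ++ [v] with l already sorted = insert v at the binary-search position.
lemma sorted_append_eq (l : List Int) (v : Int) (hs : l.Pairwise (· ≤ ·)) :
    PySem.List.sorted (l ++ [v]) (fun x => x) false =
      l.take (bsLoop l v 0 l.length) ++ v :: l.drop (bsLoop l v 0 l.length) := by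
  obtain ⟨hle, hbefore, hafter⟩ :=
    bsLoop_bounds l v hs l.length 0 l.length rfl (Nat.zero_le _) le_rfl
      (by intro j hj h; omega) (by intro j hj h; omega)
  set i := bsLoop l v 0 l.length with hidef
  have hperm : (l.take i ++ v :: l.drop i).Perm (l ++ [v]) := by
    have h1 : (l.take i ++ v :: l.drop i).Perm (v :: l) := by
      have h2 := List.perm_middle (a := v) (l₁ := l.take i) (l₂ := l.drop i)
      simpa [List.take_append_drop] using h2
    exact h1.trans (List.perm_append_singleton v l).symm
  apply PySem.List.sorted_id_eq_of_perm_of_pairwise _ _ hperm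
  rw [List.pairwise_append]
  refine ⟨hs.sublist (List.take_sublist _ _), ?_, ?_⟩
  · rw [List.pairwise_cons]
    refine ⟨?_, hs.sublist (List.drop_sublist _ _)⟩
    intro y hy
    obtain ⟨k, hk, rfl⟩ := List.getElem_of_mem hy
    have hk' : i + k < l.length := by simp [List.length_drop] at hk; omega
    rw [List.getElem_drop]
    exact hafter (i + k) hk' (by omega)
  · intro x hx y hy
    obtain ⟨j, hj, rfl⟩ := List.getElem_of_mem hx
    have hj' : j < l.length ∧ j < i := by simp [List.length_take] at hj; omega
    rw [List.getElem_take]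
    have hxlt : l[j] < v := hbefore j hj'.1 hj'.2
    rcases List.mem_cons.mp hy with rfl | hy'
    · exact le_of_lt hxlt
    · obtain ⟨k, hk, rfl⟩ := List.getElem_of_mem hy'
      have hk' : i + k < l.length := by simp [List.length_drop] at hk; omega
      rw [List.getElem_drop]
      exact le_of_lt (lt_of_lt_of_le hxlt (hafter (i + k) hk' (by omega)))

lemma go_eq (d : Nat) : ∀ (xs : List Int) (answer K : Int), xs.length = d →
    xs.Pairwise (· ≤ ·) → xs ≠ [] →
    solutionGo xs ((PySem.List.min? xs (fun y => y)).getD 0) answer K = altGo xs answer K := by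
  induction d using Nat.strong_induction_on with
  | _ d ih =>
    intro xs answer K hlen hs hne
    match xs with
    | [] => exact absurd rfl hne
    | [x] =>
        rw [solutionGo, altGo.eq_def]
        case x_1 => exact fun a b rest h => by simp at h
        by_cases hx : x < K
        all_goals simp [PySem.List.pyGet?, PySem.List.pyIdx?, hx]
    | a :: b :: rest =>
        have hhead : (PySem.List.min? (a :: b :: rest) (fun y => y)).getD 0 = a :=
          min_sorted_head a (b :: rest) hs
        have hget0 : (PySem.List.pyGet? (a :: b :: rest) 0).getD 0 = a := by
          have hpos : (0 : Int) ≤ (rest.length : Int) + 1 := by positivity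
          simp [PySem.List.pyGet?, PySem.List.pyIdx?, hpos]
        rw [solutionGo, altGo.eq_def, hhead, hget0]
        have hlen2 : ¬ ((a :: b :: rest).length ≤ 1) := by simp
        simp only [hlen2, if_false]
        by_cases haK : a < K
        · have hnotge : ¬ (a ≥ K) := by omega
          have hlenne1 : ¬ ((a :: b :: rest).length = 1) := by simp
          simp only [hnotge, if_false, haK, if_true, hlenne1]
          have hrest : rest.Pairwise (· ≤ ·) :=
            (List.pairwise_cons.mp (List.pairwise_cons.mp hs).2).2
          have hcomm : a + b * 2 = a + 2 * b := by ring
          have hkey := sorted_append_eq rest (a + 2 * b) hrest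
          rw [hcomm, hkey]
          have hys_sorted : (rest.take (bsLoop rest (a + 2 * b) 0 rest.length) ++
              (a + 2 * b) :: rest.drop (bsLoop rest (a + 2 * b) 0 rest.length)).Pairwise (· ≤ ·) := by
            rw [← hkey]; exact PySem.List.sorted_pairwise _ _
          have hys_ne : (rest.take (bsLoop rest (a + 2 * b) 0 rest.length) ++
              (a + 2 * b) :: rest.drop (bsLoop rest (a + 2 * b) 0 rest.length)) ≠ [] := by
            rw [← hkey, Ne, PySem.List.sorted_eq_nil_iff]; simp
          have hys_len : (rest.take (bsLoop rest (a + 2 * b) 0 rest.length) ++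
              (a + 2 * b) :: rest.drop (bsLoop rest (a + 2 * b) 0 rest.length)).length = rest.length + 1 := by
            rw [← hkey, PySem.List.length_sorted]; simp
          have hd : rest.length + 1 < d := by simp at hlen; omega
          exact ih (rest.length + 1) hd _ (answer + 1) K hys_len hys_sorted hys_ne
        · have hge : a ≥ K := by omega
          simp [hge, haK]

-- ===== VERDICT (by name: the statement is the Claim_ definition above) =====
theorem solution_spec : Claim_equal_solution := by
  intro scoville K hdom hpre
  unfold Spec_solution
  have hne : PySem.List.sorted scoville (fun x => x) false ≠ [] := by
    rw [Ne, PySem.List.sorted_eq_nil_iff]; exact hpre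
  have hs : (PySem.List.sorted scoville (fun x => x) false).Pairwise (· ≤ ·) :=
    PySem.List.sorted_pairwise _ _
  cases hmin : PySem.List.min? (PySem.List.sorted scoville (fun x => x) false) (fun y => y) with
  | none => exact absurd ((PySem.List.min?_eq_none_iff _ _).mp hmin) hne
  | some least =>
      have hL : least = (PySem.List.min? (PySem.List.sorted scoville (fun x => x) false) (fun y => y)).getD 0 := by
        rw [hmin]; rfl
      simp only [solution, solution_alt, hmin]
      rw [hL]
      exact go_eq _ _ 0 K rfl hs hne
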